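-- pv_equiv track=rewrite | github.com/bilalakil/challenges | codechef/cook79/chairs.py | calc_derp
-- ===== SOURCE A (Python) =====
-- def calc_derp(chairs):
--     first = chairs[0]
--     prev = first
--     movements = 0
--
--     for chair in chairs[1:]:
--         if prev == chair:
--             continue
--         elif chair == '1':
--             movements += 1
--
--         prev = chair
--
--     if first == prev and first == '1':
--         movements = max(movements - 1, 0)
--
--     return movements
-- ===== SOURCE B (Python) =====
-- def calc_derp(chairs):
--     first, last = chairs[0], chairs[-1]
--     # run-length decomposition: keys of maximal runs of equal chars
--     runs = []
--     for c in chairs: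
--         if not runs or runs[-1] != c:
--             runs.append(c)
--     # every '1'-run except one starting at position 0 is a rising edge
--     movements = runs.count('1') - (1 if runs[0] == '1' else 0)
--     if first == '1' and last == '1':
--         movements = max(movements - 1, 0)
--     return movements
-- ===== Notes on version B (the rewrite author's own statement) =====
-- stated objective: alternative
-- what changed: Replaces A's prev-state transition loop with a run-length decomposition: build the list of maximal-run keys, count the '1'-runs and subtract one for a leading '1'-run, then apply the same circular adjustment; Pre_ excludes only the empty string, on which both implementations raise IndexError.
import Mathlib
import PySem

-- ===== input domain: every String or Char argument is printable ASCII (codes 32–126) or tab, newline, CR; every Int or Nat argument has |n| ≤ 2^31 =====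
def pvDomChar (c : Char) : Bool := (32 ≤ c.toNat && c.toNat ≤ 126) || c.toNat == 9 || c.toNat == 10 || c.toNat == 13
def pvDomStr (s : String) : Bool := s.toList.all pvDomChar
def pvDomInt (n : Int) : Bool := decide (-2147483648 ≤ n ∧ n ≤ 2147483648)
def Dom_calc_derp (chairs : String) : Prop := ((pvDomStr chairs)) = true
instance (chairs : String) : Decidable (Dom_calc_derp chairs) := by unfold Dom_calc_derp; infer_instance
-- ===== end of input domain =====

-- B replaces A's prev-state transition loop with a run-length decomposition (maximal-run keys,
-- count '1'-runs, subtract a leading one); objective: alternative, same O(n) cost.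

-- ===== PORT A =====
-- A: first = chairs[0]; loop over chairs[1:] carrying (prev, movements); final circular fixup.
-- pvStepA is the loop body of A's for-loop (the `continue` is the first branch).
def pvStepA (s : Char × Int) (chair : Char) : Char × Int :=
  if s.1 == chair then s
  else if chair == '1' then (chair, s.2 + 1)
  else (chair, s.2)

def calc_derp (chairs : String) : Int :=
  match PySem.List.pyGet? chairs.toList 0 with
  | none => 0   -- chairs[0] raises IndexError on the empty string (excluded by Pre_)
  | some first =>
    let st := (PySem.List.slice chairs.toList (some 1) none).foldl pvStepA (first, 0)
    if first == st.1 && first == '1' then max (st.2 - 1) 0 else st.2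

-- ===== PORT B =====
-- B: build the list of maximal-run keys (append c when it differs from runs[-1]),
-- movements = runs.count('1') - (1 if runs[0]=='1' else 0), then the circular fixup.
def pvAddRun (rs : List Char) (c : Char) : List Char :=
  if rs.getLast? == some c then rs else rs ++ [c]

def calc_derp_alt (chairs : String) : Int :=
  match PySem.List.pyGet? chairs.toList 0, PySem.List.pyGet? chairs.toList (-1) with
  | some first, some last =>
    let runs := chairs.toList.foldl pvAddRun []
    let movements : Int :=
      (PySem.List.count runs '1' : Int)
        - (if PySem.List.pyGet? runs 0 == some '1' then 1 else 0)
    if first == '1' && last == '1' then max (movements - 1) 0 else movements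
  | _, _ => 0   -- unreachable under Pre_ (empty string raises IndexError in Python)

-- ===== PRECONDITION & SPEC =====
-- Pre_ excludes exactly the empty string, on which both Pythons raise IndexError at chairs[0].
def Pre_calc_derp (chairs : String) : Prop := chairs ≠ ""
instance (chairs : String) : Decidable (Pre_calc_derp chairs) := by unfold Pre_calc_derp; infer_instance
def pvWitness_calc_derp : String := ("0110")

def Spec_calc_derp (chairs : String) (out : Int) : Prop := out = calc_derp_alt chairs
instance (chairs : String) (out : Int) : Decidable (Spec_calc_derp chairs out) := by unfold Spec_calc_derp; infer_instance

-- ===== CLAIM (what is proved, stated in full; the proofs are below) =====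
def Claim_equal_calc_derp : Prop := ∀ (chairs : String), Dom_calc_derp chairs → Pre_calc_derp chairs → Spec_calc_derp chairs (calc_derp chairs)

-- ===== LEMMAS AND PROOFS =====

-- number of rising edges into '1' along p :: l
def pvEdges : Char → List Char → Int
  | _, [] => 0
  | p, c :: t => (if c == '1' && p != '1' then 1 else 0) + pvEdges c t

-- the maximal-run keys of p :: l
def pvRunKeys : Char → List Char → List Char
  | p, [] => [p]
  | p, c :: t => if p = c then pvRunKeys p t else p :: pvRunKeys c t

theorem pvGetLastQ_cons (c : Char) (t : List Char) : (c :: t).getLast? = some (t.getLastD c) := by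
  induction t generalizing c with
  | nil => rfl
  | cons d t ih => rw [List.getLastD_cons, List.getLast?_cons_cons]; exact ih d

-- A's loop ends with prev = last element and movements = rising-edge count from p
theorem pvFoldA (l : List Char) (p : Char) (m : Int) :
    l.foldl pvStepA (p, m) = (l.getLastD p, m + pvEdges p l) := by
  induction l generalizing p m with
  | nil => simp [pvEdges]
  | cons c t ih =>
    rw [List.foldl_cons]
    by_cases hpc : p = c
    · have hs : pvStepA (p, m) c = (c, m) := by simp [pvStepA, hpc]
      rw [hs, ih, List.getLastD_cons]
      have : (c == '1' && p != '1') = false := by simp [hpc]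
      simp [pvEdges, this]
    · by_cases hc : c = '1'
      · subst hc
        have hs : pvStepA (p, m) '1' = ('1', m + 1) := by simp [pvStepA, hpc]
        rw [hs, ih, List.getLastD_cons]
        have : ('1' == '1' && p != '1') = true := by simp [hpc]
        simp only [pvEdges, this, Prod.mk.injEq, true_and, if_true]
        ring
      · have hs : pvStepA (p, m) c = (c, m) := by simp [pvStepA, hpc, hc]
        rw [hs, ih, List.getLastD_cons]
        have : (c == '1' && p != '1') = false := by simp [hc]
        simp [pvEdges, this]

-- B's fold builds exactly the run keys (accumulator with last element p)
theorem pvFoldB (l : List Char) (rs : List Char) (p : Char) :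
    l.foldl pvAddRun (rs ++ [p]) = rs ++ pvRunKeys p l := by
  induction l generalizing rs p with
  | nil => simp [pvRunKeys]
  | cons c t ih =>
    rw [List.foldl_cons]
    by_cases hpc : p = c
    · have hs : pvAddRun (rs ++ [p]) c = rs ++ [p] := by
        simp [pvAddRun, List.getLast?_append, hpc]
      rw [hs, ih, pvRunKeys, if_pos hpc]
    · have hs : pvAddRun (rs ++ [p]) c = rs ++ [p] ++ [c] := by
        simp [pvAddRun, List.getLast?_append, hpc]
      rw [hs, ih (rs ++ [p]) c, pvRunKeys, if_neg hpc]
      simp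

theorem pvRunKeys_head (p : Char) (l : List Char) : ∃ t, pvRunKeys p l = p :: t := by
  induction l generalizing p with
  | nil => exact ⟨[], rfl⟩
  | cons c t ih =>
    by_cases hpc : p = c
    · obtain ⟨t', ht⟩ := ih p
      exact ⟨t', by rw [pvRunKeys, if_pos hpc, ht]⟩
    · exact ⟨pvRunKeys c t, by rw [pvRunKeys, if_neg hpc]⟩

-- count of '1'-runs = leading-'1' indicator + rising-edge count
theorem pvCountRuns (l : List Char) (p : Char) :
    ((pvRunKeys p l).count '1' : Int)
      = (if p == '1' then 1 else 0) + pvEdges p l := by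
  induction l generalizing p with
  | nil => by_cases h : p = '1' <;> simp [pvRunKeys, pvEdges, h]
  | cons c t ih =>
    by_cases hpc : p = c
    · subst hpc
      rw [pvRunKeys, if_pos rfl, ih]
      simp [pvEdges]
    · rw [pvRunKeys, if_neg hpc, List.count_cons, pvEdges]
      push_cast
      rw [ih c]
      by_cases hp : p = '1' <;> by_cases hc : c = '1' <;>
        simp [hp, hc, Ne.symm]
      · exact absurd (hp.trans hc.symm) hpc
      · ring

-- ===== VERDICT (by name: the statement is the Claim_ definition above) =====
theorem calc_derp_spec : Claim_equal_calc_derp := by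
  intro chairs _ hpre
  unfold Spec_calc_derp calc_derp calc_derp_alt
  obtain ⟨c, t, hl⟩ : ∃ c t, chairs.toList = c :: t := by
    cases h : chairs.toList with
    | nil => exact absurd (String.toList_eq_nil_iff.mp h) hpre
    | cons c t => exact ⟨c, t, rfl⟩
  rw [hl, PySem.List.pyGet?_zero_cons, PySem.List.pyGet?_neg_one, PySem.List.slice_from_one,
    pvGetLastQ_cons]
  have hfold : (c :: t).foldl pvAddRun [] = pvRunKeys c t := by
    have := pvFoldB t [] c
    simpa using this
  obtain ⟨t', ht'⟩ := pvRunKeys_head c t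
  simp only [List.tail_cons, pvFoldA, hfold, zero_add]
  rw [PySem.List.count_eq, pvCountRuns, ht', PySem.List.pyGet?_zero_cons]
  generalize t.getLastD c = x
  by_cases h1 : c = '1'
  · subst h1
    by_cases h2 : x = '1'
    · subst h2; simp
    · have ha : ('1' == x) = false := by simp [Ne.symm h2]
      have hb : (x == '1') = false := by simp [h2]
      simp [ha, hb]
  · have hc : (c == '1') = false := by simp [h1]
    simp [hc]
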